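-- pv_equiv track=rewrite | github.com/mohit-11011/leetcode | Enemy - GFG/enemy.py | largestArea
-- ===== SOURCE A (Python) =====
-- from typing import List
-- from typing import List
--
-- def largestArea(n:int,m:int,k:int, enemy : List[List[int]]) -> int:
--     # code here
--     x=[]
--     y=[]
--     for j in enemy:
--         x.append(j[0])
--     for j in enemy:
--         y.append(j[1])
--     x.append(0)
--     x.append(n+1)
--     y.append(0)
--     y.append(m+1)
--     x.sort()
--     y.sort()
--     maxx=0
--     maxy=0
--     for i in range(1,len(x)):
--         maxx=max(maxx,x[i]-x[i-1]-1)
--     for i in range(1,len(y)):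
--         maxy=max(maxy,y[i]-y[i-1]-1)
--     return maxx*maxy
-- ===== SOURCE B (Python) =====
-- def _maxgap(vals):
--     # largest run of free cells between successive blockers, by repeated
--     # min-extraction over the shrinking set of remaining values (no sort)
--     cur = min(vals)
--     rest = [v for v in vals if v > cur]
--     best = 0
--     while rest:
--         nxt = min(rest)
--         best = max(best, nxt - cur - 1)
--         cur = nxt
--         rest = [v for v in rest if v > nxt]
--     return best
--
--
-- def largestArea(n: int, m: int, k: int, enemy):
--     xs = [e[0] for e in enemy] + [0, n + 1]
--     ys = [e[1] for e in enemy] + [0, m + 1]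
--     return _maxgap(xs) * _maxgap(ys)
-- ===== Notes on version B (the rewrite author's own statement) =====
-- stated objective: alternative
-- what changed: B drops the sort-then-adjacent-index-scan and computes each maximum gap by repeated min-extraction: take the minimum, filter out everything not above it, and accumulate the gap between successive minima.
import Mathlib
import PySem

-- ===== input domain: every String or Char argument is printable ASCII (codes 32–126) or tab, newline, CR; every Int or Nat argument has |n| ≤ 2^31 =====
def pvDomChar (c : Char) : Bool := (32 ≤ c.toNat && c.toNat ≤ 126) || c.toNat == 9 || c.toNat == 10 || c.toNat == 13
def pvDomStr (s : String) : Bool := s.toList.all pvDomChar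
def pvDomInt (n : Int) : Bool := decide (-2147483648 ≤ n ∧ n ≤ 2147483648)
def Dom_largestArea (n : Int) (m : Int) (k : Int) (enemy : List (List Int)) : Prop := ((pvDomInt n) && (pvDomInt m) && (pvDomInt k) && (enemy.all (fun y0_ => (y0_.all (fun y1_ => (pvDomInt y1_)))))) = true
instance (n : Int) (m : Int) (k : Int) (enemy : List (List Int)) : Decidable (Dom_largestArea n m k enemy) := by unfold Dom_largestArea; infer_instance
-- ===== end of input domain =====

-- B replaces A's sort + adjacent index scan by repeated min-extraction over the
-- remaining blockers (objective: alternative algorithm, no sorting).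

-- ===== PORT A =====
-- j[0] / j[1] are pyGetD with default 0; Pre_ excludes the rows where Python raises
def largestArea (n : Int) (m : Int) (k : Int) (enemy : List (List Int)) : Int :=
  let x := enemy.foldl (fun acc j => acc ++ [PySem.List.pyGetD j 0 0]) []
  let y := enemy.foldl (fun acc j => acc ++ [PySem.List.pyGetD j 1 0]) []
  let x := x ++ [0]
  let x := x ++ [n + 1]
  let y := y ++ [0]
  let y := y ++ [m + 1]
  let x := PySem.List.sorted x (fun v => v) false
  let y := PySem.List.sorted y (fun v => v) false
  let maxx := (PySem.List.pyRange 1 (x.length : Int) 1).foldl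
    (fun acc i => max acc (PySem.List.pyGetD x i 0 - PySem.List.pyGetD x (i - 1) 0 - 1)) 0
  let maxy := (PySem.List.pyRange 1 (y.length : Int) 1).foldl
    (fun acc i => max acc (PySem.List.pyGetD y i 0 - PySem.List.pyGetD y (i - 1) 0 - 1)) 0
  maxx * maxy

-- ===== PORT B =====
-- the 'while rest:' loop of Source B's _maxgap
def altGapLoop (cur : Int) (rest : List Int) (best : Int) : Int :=
  match h : PySem.List.min? rest (fun v => v) with
  | none => best
  | some nxt => altGapLoop nxt (rest.filter (fun v => decide (nxt < v))) (max best (nxt - cur - 1))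
termination_by rest.length
decreasing_by
  have hmem : nxt ∈ rest := PySem.List.min?_mem h
  simp only [List.length_unattach]
  calc (rest.attach.filter (fun x => decide (nxt < x.1))).length
      < rest.attach.length :=
        List.length_filter_lt_length_iff_exists.mpr ⟨⟨nxt, hmem⟩, List.mem_attach _ _, by simp⟩
    _ = rest.length := List.length_attach

-- min(vals): vals is always nonempty at the call sites (it contains 0 and n+1)
def altMaxgap (vals : List Int) : Int :=
  match PySem.List.min? vals (fun v => v) with
  | none => 0
  | some cur => altGapLoop cur (vals.filter (fun v => decide (cur < v))) 0

def largestArea_alt (n : Int) (m : Int) (k : Int) (enemy : List (List Int)) : Int :=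
  let xs := enemy.map (fun e => PySem.List.pyGetD e 0 0) ++ [0, n + 1]
  let ys := enemy.map (fun e => PySem.List.pyGetD e 1 0) ++ [0, m + 1]
  altMaxgap xs * altMaxgap ys

-- ===== PRECONDITION & SPEC =====
-- Python A raises IndexError on any enemy row with fewer than two entries; exactly those inputs are excluded
def Pre_largestArea (n : Int) (m : Int) (k : Int) (enemy : List (List Int)) : Prop :=
  ∀ j ∈ enemy, 2 ≤ j.length
instance (n : Int) (m : Int) (k : Int) (enemy : List (List Int)) : Decidable (Pre_largestArea n m k enemy) := by unfold Pre_largestArea; infer_instance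
def pvWitness_largestArea : Int × Int × Int × List (List Int) := (2, 2, 1, [[1, 1]])

def Spec_largestArea (n : Int) (m : Int) (k : Int) (enemy : List (List Int)) (out : Int) : Prop := out = largestArea_alt n m k enemy
instance (n : Int) (m : Int) (k : Int) (enemy : List (List Int)) (out : Int) : Decidable (Spec_largestArea n m k enemy out) := by unfold Spec_largestArea; infer_instance

-- ===== CLAIM (what is proved, stated in full; the proofs are below) =====
def Claim_equal_largestArea : Prop := ∀ (n : Int) (m : Int) (k : Int) (enemy : List (List Int)), Dom_largestArea n m k enemy → Pre_largestArea n m k enemy → Spec_largestArea n m k enemy (largestArea n m k enemy)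

-- ===== LEMMAS AND PROOFS =====

-- structural form of A's adjacent-gap index scan
def scanAdj (best : Int) : List Int → Int
  | a :: b :: t => scanAdj (max best (b - a - 1)) (b :: t)
  | _ => best

theorem natfold_eq_scanAdj (s : List Int) : ∀ best : Int,
    (List.range (s.length - 1)).foldl (fun acc k => max acc (s.getD (k + 1) 0 - s.getD k 0 - 1)) best
      = scanAdj best s := by
  induction s with
  | nil => intro best; simp [scanAdj]
  | cons a t ih =>
    intro best
    cases t with
    | nil => simp [scanAdj]
    | cons b t' =>
      have hlen : (a :: b :: t').length - 1 = t'.length + 1 := by simp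
      rw [hlen, List.range_succ_eq_map, List.foldl_cons, List.foldl_map]
      simp only [List.getD_cons_succ, List.getD_cons_zero]
      rw [scanAdj]
      simpa using ih (max best (b - a - 1))

theorem foldA_eq_scanAdj (s : List Int) (best : Int) :
    (PySem.List.pyRange 1 (s.length : Int) 1).foldl
      (fun acc i => max acc (PySem.List.pyGetD s i 0 - PySem.List.pyGetD s (i - 1) 0 - 1)) best
      = scanAdj best s := by
  rw [PySem.List.pyRange_one, List.foldl_map]
  have ht : ((s.length : Int) - 1).toNat = s.length - 1 := by omega
  have hb : (fun (acc : Int) (k : Nat) => max acc (PySem.List.pyGetD s (1 + (k:Int)) 0 - PySem.List.pyGetD s (1 + (k:Int) - 1) 0 - 1))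
      = fun acc k => max acc (s.getD (k+1) 0 - s.getD k 0 - 1) := by
    funext acc k
    have h1 : (1:Int) + (k:Int) = ((k+1 : Nat) : Int) := by push_cast; ring
    have h2 : ((k+1 : Nat):Int) - 1 = ((k:Nat):Int) := by push_cast; ring
    rw [h1, h2, PySem.List.pyGetD_natCast, PySem.List.pyGetD_natCast]
  rw [ht, hb, natfold_eq_scanAdj]

theorem altGapLoop_eq_none (cur best : Int) (rest : List Int)
    (h : PySem.List.min? rest (fun v => v) = none) : altGapLoop cur rest best = best := by
  rw [altGapLoop.eq_def]
  split <;> simp_all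

theorem altGapLoop_eq_some (cur best nxt : Int) (rest : List Int)
    (h : PySem.List.min? rest (fun v => v) = some nxt) :
    altGapLoop cur rest best
      = altGapLoop nxt (rest.filter (fun v => decide (nxt < v))) (max best (nxt - cur - 1)) := by
  rw [altGapLoop.eq_def]
  split <;> simp_all

theorem min?_id_value {l : List Int} {v : Int} (h : PySem.List.min? l (fun x => x) = some v) :
    v ∈ l ∧ ∀ y ∈ l, v ≤ y :=
  ⟨PySem.List.min?_mem h, fun y hy => PySem.List.min?_isMin h y hy⟩

theorem min?_id_perm {l l' : List Int} (hp : l.Perm l') :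
    ∀ {v : Int}, PySem.List.min? l (fun x => x) = some v →
      PySem.List.min? l' (fun x => x) = some v := by
  intro v h
  obtain ⟨hv, hmin⟩ := min?_id_value h
  cases h' : PySem.List.min? l' (fun x => x) with
  | none =>
    have : l' = [] := (PySem.List.min?_eq_none_iff _ _).mp h'
    subst this
    exact absurd (hp.mem_iff.mp hv) (by simp)
  | some w =>
    obtain ⟨hw, hminw⟩ := min?_id_value h'
    have h1 : v ≤ w := hmin w (hp.mem_iff.mpr hw)
    have h2 : w ≤ v := hminw v (hp.mem_iff.mp hv)
    rw [le_antisymm h2 h1]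

theorem altGapLoop_perm_aux (N : Nat) : ∀ (rest rest' : List Int), rest.length ≤ N →
    rest.Perm rest' → ∀ (cur best : Int), altGapLoop cur rest best = altGapLoop cur rest' best := by
  induction N with
  | zero =>
    intro rest rest' hlen hp cur best
    have h0 : rest = [] := List.length_eq_zero_iff.mp (Nat.le_zero.mp hlen)
    subst h0
    rw [← hp.nil_eq]
  | succ N ih =>
    intro rest rest' hlen hp cur best
    cases h : PySem.List.min? rest (fun v => v) with
    | none =>
      have hnil : rest = [] := (PySem.List.min?_eq_none_iff _ _).mp h
      subst hnil
      have h' : PySem.List.min? rest' (fun v => v) = none := by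
        rw [PySem.List.min?_eq_none_iff _ _, ← hp.nil_eq]
      rw [altGapLoop_eq_none _ _ _ h, altGapLoop_eq_none _ _ _ h']
    | some v =>
      have h' := min?_id_perm hp h
      rw [altGapLoop_eq_some _ _ _ _ h, altGapLoop_eq_some _ _ _ _ h']
      have hmem : v ∈ rest := PySem.List.min?_mem h
      have hlt : (rest.filter (fun x => decide (v < x))).length < rest.length :=
        List.length_filter_lt_length_iff_exists.mpr ⟨v, hmem, by simp⟩
      exact ih _ _ (by omega) (hp.filter _) _ _

theorem altGapLoop_perm (rest rest' : List Int) (hp : rest.Perm rest') (cur best : Int) :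
    altGapLoop cur rest best = altGapLoop cur rest' best :=
  altGapLoop_perm_aux rest.length rest rest' le_rfl hp cur best

theorem min?_cons_of_le (b : Int) (l : List Int) (hb : ∀ y ∈ l, b ≤ y) :
    PySem.List.min? (b :: l) (fun y => y) = some b := by
  rw [PySem.List.min?_id_cons]
  congr 1
  rcases PySem.List.foldl_min_mem l b with h | h
  · exact h
  · exact le_antisymm (PySem.List.foldl_min_le l b).1 (hb _ h)

theorem scanAdj_eq_loop : ∀ (t : List Int) (a best : Int), -1 ≤ best →
    (a :: t).Pairwise (· ≤ ·) →
    scanAdj best (a :: t) = altGapLoop a (t.filter (fun v => decide (a < v))) best := by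
  intro t
  induction t with
  | nil =>
    intro a best hb hp
    rw [List.filter_nil, altGapLoop_eq_none _ _ _ ((PySem.List.min?_eq_none_iff _ _).mpr rfl)]
    rfl
  | cons b t' ih =>
    intro a best hb hp
    have hab : a ≤ b := (List.pairwise_cons.mp hp).1 b (by simp)
    have hp' : (b :: t').Pairwise (· ≤ ·) := (List.pairwise_cons.mp hp).2
    by_cases hlt : a < b
    · rw [scanAdj, ih b (max best (b - a - 1)) (by omega) hp']
      rw [List.filter_cons_of_pos (by simpa using hlt)]
      rw [altGapLoop_eq_some _ _ b _ (min?_cons_of_le b _ (fun y hy =>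
        (List.pairwise_cons.mp hp').1 y (List.mem_of_mem_filter hy)))]
      rw [List.filter_cons_of_neg (by simp)]
      have hff : (t'.filter (fun v => decide (a < v))).filter (fun v => decide (b < v))
          = t'.filter (fun v => decide (b < v)) := by
        rw [List.filter_filter]
        apply List.filter_congr
        intro x hx
        by_cases hbx : b < x
        · simp [hbx, lt_trans hlt hbx]
        · simp [hbx]
      rw [hff]
    · have heq : b = a := le_antisymm (not_lt.mp hlt) hab
      subst heq
      rw [scanAdj]
      have hmax : max best (b - b - 1) = best := by omega
      rw [hmax, ih b best hb hp']
      rw [List.filter_cons_of_neg (by simp)]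

theorem maxgap_eq (L : List Int) (hne : L ≠ []) :
    scanAdj 0 (PySem.List.sorted L (fun v => v) false) = altMaxgap L := by
  have hperm : (PySem.List.sorted L (fun v => v) false).Perm L := PySem.List.sorted_perm L _ false
  cases hs : PySem.List.sorted L (fun v => v) false with
  | nil => exact absurd ((PySem.List.sorted_eq_nil_iff _ _ _).mp hs) hne
  | cons a t =>
    rw [hs] at hperm
    have hmin : PySem.List.min? L (fun v => v) = some a := by
      cases h : PySem.List.min? L (fun v => v) with
      | none => exact absurd ((PySem.List.min?_eq_none_iff _ _).mp h) hne
      | some c =>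
        obtain ⟨hc, hcmin⟩ := min?_id_value h
        have ha : a ∈ L := hperm.mem_iff.mp (by simp)
        have h1 : c ≤ a := hcmin a ha
        have h2 : a ≤ c := PySem.List.key_head_sorted_le L (fun v => v) hs c hc
        rw [le_antisymm h1 h2]
    have hpw : (a :: t).Pairwise (· ≤ ·) := by
      have := PySem.List.sorted_pairwise L (fun v => v)
      rw [hs] at this
      exact this
    rw [scanAdj_eq_loop t a 0 (by omega) hpw]
    unfold altMaxgap
    rw [hmin]
    apply altGapLoop_perm
    have : (a :: t).filter (fun v => decide (a < v)) = t.filter (fun v => decide (a < v)) :=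
      List.filter_cons_of_neg (by simp)
    rw [← this]
    exact hperm.filter _

-- ===== VERDICT (by name: the statement is the Claim_ definition above) =====
theorem largestArea_spec : Claim_equal_largestArea := by
  intro n m k enemy _ _
  unfold Spec_largestArea largestArea largestArea_alt
  simp only [PySem.List.foldl_append_singleton_eq_map, List.nil_append, List.append_assoc,
    List.cons_append, List.nil_append]
  rw [foldA_eq_scanAdj, foldA_eq_scanAdj,
    maxgap_eq _ (by simp), maxgap_eq _ (by simp)]
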